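-- pv_equiv track=rewrite | github.com/johnwassfy/PyBlocks | ai_service/app/services/recommender.py | _get_next_milestone
-- ===== SOURCE A (Python) =====
-- def _get_next_milestone(completed_count: int) -> str:
--     """Get next achievement milestone"""
--     milestones = {
--         5: "Complete 5 missions to unlock the 'Getting Started' badge",
--         10: "Complete 10 missions to unlock the 'Dedicated Learner' badge",
--         25: "Complete 25 missions to unlock the 'Python Explorer' badge",
--         50: "Complete 50 missions to unlock the 'Code Master' badge",
--         100: "Complete 100 missions to unlock the 'Python Legend' badge",
--     }
--
--     for count, milestone in sorted(milestones.items()):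
--         if completed_count < count:
--             return milestone
--
--     return "You've unlocked all milestones! Keep learning!"
-- ===== SOURCE B (Python) =====
-- import bisect
--
-- _THRESHOLDS = [5, 10, 25, 50, 100]
-- _MESSAGES = [
--     "Complete 5 missions to unlock the 'Getting Started' badge",
--     "Complete 10 missions to unlock the 'Dedicated Learner' badge",
--     "Complete 25 missions to unlock the 'Python Explorer' badge",
--     "Complete 50 missions to unlock the 'Code Master' badge",
--     "Complete 100 missions to unlock the 'Python Legend' badge",
-- ]
--
-- def _get_next_milestone(completed_count: int) -> str:
--     i = bisect.bisect_right(_THRESHOLDS, completed_count)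
--     if i < len(_MESSAGES):
--         return _MESSAGES[i]
--     return "You've unlocked all milestones! Keep learning!"
-- ===== Notes on version B (the rewrite author's own statement) =====
-- stated objective: idiomatic
-- what changed: Replaced the linear ordered scan over a dict's sorted items with bisect.bisect_right on a sorted threshold list indexing a parallel message list.
import Mathlib
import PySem

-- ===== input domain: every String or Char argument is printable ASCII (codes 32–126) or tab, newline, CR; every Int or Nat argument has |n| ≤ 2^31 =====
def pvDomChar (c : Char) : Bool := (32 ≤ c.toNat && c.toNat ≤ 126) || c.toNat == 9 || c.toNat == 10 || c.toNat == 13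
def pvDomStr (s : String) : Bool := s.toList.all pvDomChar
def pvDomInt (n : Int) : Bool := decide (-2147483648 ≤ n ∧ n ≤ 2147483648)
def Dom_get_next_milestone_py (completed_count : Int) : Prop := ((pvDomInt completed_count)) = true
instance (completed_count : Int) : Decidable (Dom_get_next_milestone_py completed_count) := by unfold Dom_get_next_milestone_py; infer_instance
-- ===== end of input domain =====

-- ===== PORT A =====
-- milestones dict, sorted items; loop returns first milestone with completed_count < count
def pvMilestonesSorted : List (Int × String) :=
  [(5, "Complete 5 missions to unlock the 'Getting Started' badge"),
   (10, "Complete 10 missions to unlock the 'Dedicated Learner' badge"),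
   (25, "Complete 25 missions to unlock the 'Python Explorer' badge"),
   (50, "Complete 50 missions to unlock the 'Code Master' badge"),
   (100, "Complete 100 missions to unlock the 'Python Legend' badge")]

def pvLoopA (completed_count : Int) : List (Int × String) → String
  | [] => "You've unlocked all milestones! Keep learning!"
  | (count, milestone) :: rest =>
      if completed_count < count then milestone else pvLoopA completed_count rest

def get_next_milestone_py (completed_count : Int) : String :=
  pvLoopA completed_count pvMilestonesSorted

-- ===== PORT B =====
def pvThresholds : List Int := [5, 10, 25, 50, 100]
def pvMessages : List String :=
  ["Complete 5 missions to unlock the 'Getting Started' badge",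
   "Complete 10 missions to unlock the 'Dedicated Learner' badge",
   "Complete 25 missions to unlock the 'Python Explorer' badge",
   "Complete 50 missions to unlock the 'Code Master' badge",
   "Complete 100 missions to unlock the 'Python Legend' badge"]

-- bisect.bisect_right on a sorted list = number of elements ≤ x (library call ported by its contract)
def pvBisectRight (xs : List Int) (x : Int) : Nat := xs.countP (fun t => t ≤ x)

def get_next_milestone_py_alt (completed_count : Int) : String :=
  let i := pvBisectRight pvThresholds completed_count
  if h : i < pvMessages.length then pvMessages[i]
  else "You've unlocked all milestones! Keep learning!"

-- ===== PRECONDITION & SPEC =====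
def Spec_get_next_milestone_py (completed_count : Int) (out : String) : Prop := out = get_next_milestone_py_alt completed_count
instance (completed_count : Int) (out : String) : Decidable (Spec_get_next_milestone_py completed_count out) := by unfold Spec_get_next_milestone_py; infer_instance

-- ===== CLAIM (what is proved, stated in full; the proofs are below) =====
def Claim_equal_get_next_milestone_py : Prop := ∀ (completed_count : Int), Dom_get_next_milestone_py completed_count → Spec_get_next_milestone_py completed_count (get_next_milestone_py completed_count)

-- ===== LEMMAS AND PROOFS =====
-- one honest line: B replaces A's ordered scan by bisect_right (count of thresholds ≤ n) into a parallel message list; idiomatic, same values.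

-- ===== VERDICT (by name: the statement is the Claim_ definition above) =====
-- pvBisectRight on the fixed threshold list, evaluated by interval
theorem pvBisect_val (c : Int) : pvBisectRight pvThresholds c =
    (if c < 5 then 0 else if c < 10 then 1 else if c < 25 then 2
     else if c < 50 then 3 else if c < 100 then 4 else 5) := by
  simp only [pvBisectRight, pvThresholds, List.countP, List.countP.go]
  split_ifs with h5 h10 h25 h50 h100 <;>
    [ (rw [decide_eq_false (by omega : ¬ (5:Int) ≤ c), decide_eq_false (by omega : ¬ (10:Int) ≤ c),
          decide_eq_false (by omega : ¬ (25:Int) ≤ c), decide_eq_false (by omega : ¬ (50:Int) ≤ c),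
          decide_eq_false (by omega : ¬ (100:Int) ≤ c)]);
      (rw [decide_eq_true (by omega : (5:Int) ≤ c), decide_eq_false (by omega : ¬ (10:Int) ≤ c),
          decide_eq_false (by omega : ¬ (25:Int) ≤ c), decide_eq_false (by omega : ¬ (50:Int) ≤ c),
          decide_eq_false (by omega : ¬ (100:Int) ≤ c)]);
      (rw [decide_eq_true (by omega : (5:Int) ≤ c), decide_eq_true (by omega : (10:Int) ≤ c),
          decide_eq_false (by omega : ¬ (25:Int) ≤ c), decide_eq_false (by omega : ¬ (50:Int) ≤ c),
          decide_eq_false (by omega : ¬ (100:Int) ≤ c)]);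
      (rw [decide_eq_true (by omega : (5:Int) ≤ c), decide_eq_true (by omega : (10:Int) ≤ c),
          decide_eq_true (by omega : (25:Int) ≤ c), decide_eq_false (by omega : ¬ (50:Int) ≤ c),
          decide_eq_false (by omega : ¬ (100:Int) ≤ c)]);
      (rw [decide_eq_true (by omega : (5:Int) ≤ c), decide_eq_true (by omega : (10:Int) ≤ c),
          decide_eq_true (by omega : (25:Int) ≤ c), decide_eq_true (by omega : (50:Int) ≤ c),
          decide_eq_false (by omega : ¬ (100:Int) ≤ c)]);
      (rw [decide_eq_true (by omega : (5:Int) ≤ c), decide_eq_true (by omega : (10:Int) ≤ c),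
          decide_eq_true (by omega : (25:Int) ≤ c), decide_eq_true (by omega : (50:Int) ≤ c),
          decide_eq_true (by omega : (100:Int) ≤ c)])] <;> rfl

-- ===== VERDICT =====
theorem get_next_milestone_py_spec : Claim_equal_get_next_milestone_py := by
  intro c _
  unfold Spec_get_next_milestone_py get_next_milestone_py get_next_milestone_py_alt
  simp only [pvMilestonesSorted, pvLoopA, pvBisect_val c, pvMessages]
  split_ifs <;> (try rfl) <;>
    (exfalso; simp only [List.length_cons, List.length_nil] at *; omega)
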